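-- pv_equiv track=rewrite | github.com/sidhuns/Python-Prog-work | Lab 2 - Required Questions .py | largest_factor
-- ===== SOURCE A (Python) =====
-- def largest_factor(n):
--     """Return the largest factor of n that is smaller than n.
--
--     >>> largest_factor(15) # factors are 1, 3, 5
--     5
--     >>> largest_factor(80) # factors are 1, 2, 4, 5, 8, 10, 16, 20, 40
--     40
--     """
--     john = 1
--     biggest1= 1
--     biggest2= 0
--     for i in range(n):
--         if n % john == 0:
--             biggest2 = john
--         if biggest1 < biggest2 and biggest2 != n:
--             biggest1 = biggest2
--         john = john + 1
--
--
--     return biggest1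
-- ===== SOURCE B (Python) =====
-- def largest_factor(n):
--     """Return the largest factor of n that is smaller than n."""
--     if n <= 1:
--         return 1
--     d = 2
--     while d * d <= n:
--         if n % d == 0:
--             return n // d
--         d += 1
--     return 1
-- ===== Notes on version B (the rewrite author's own statement) =====
-- stated objective: faster
-- what changed: Instead of scanning every candidate up to n for divisors, B trial-divides by increasing candidates up to the square root of n and returns n divided by the smallest nontrivial divisor found, or the trivial factor when none exists (prime or degenerate n).
import Mathlib
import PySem

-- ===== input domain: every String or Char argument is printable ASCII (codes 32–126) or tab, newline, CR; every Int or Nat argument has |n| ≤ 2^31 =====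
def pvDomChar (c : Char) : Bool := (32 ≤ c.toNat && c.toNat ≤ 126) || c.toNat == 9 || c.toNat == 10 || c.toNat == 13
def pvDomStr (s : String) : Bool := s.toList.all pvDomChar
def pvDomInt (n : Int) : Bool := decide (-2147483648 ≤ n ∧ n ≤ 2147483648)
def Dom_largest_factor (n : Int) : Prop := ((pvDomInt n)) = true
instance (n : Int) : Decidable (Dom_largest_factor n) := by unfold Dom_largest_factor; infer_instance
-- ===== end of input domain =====

-- B replaces A's scan of every candidate up to n by trial division up to √n: n divided by
-- its smallest nontrivial divisor is the largest proper factor; the trivial factor otherwise.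

-- ===== PORT A =====
-- loop body of A's `for i in range(n)`; state = (john, biggest1, biggest2)
def stepA (n : Int) (s : Int × Int × Int) : Int × Int × Int :=
  let b2 := if PySem.Int.mod n s.1 = 0 then s.1 else s.2.2
  let b1 := if s.2.1 < b2 ∧ b2 ≠ n then b2 else s.2.1
  (s.1 + 1, b1, b2)

def largest_factor (n : Int) : Int :=
  ((PySem.List.pyRange 0 n 1).foldl (fun s _i => stepA n s) (1, 1, 0)).2.1

-- ===== PORT B =====
-- B's `while d * d <= n` loop looking for the smallest divisor d ≥ 2
def lfTrial (n d : Int) : Int :=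
  if h : d * d ≤ n then
    if PySem.Int.mod n d = 0 then PySem.Int.floordiv n d
    else lfTrial n (d + 1)
  else 1
termination_by (n + 1 - d).toNat
decreasing_by
  have : d ≤ n := by nlinarith [sq_nonneg d, sq_nonneg (d - 1)]
  omega

def largest_factor_alt (n : Int) : Int :=
  if n ≤ 1 then 1 else lfTrial n 2

-- ===== PRECONDITION & SPEC =====
def Spec_largest_factor (n : Int) (out : Int) : Prop := out = largest_factor_alt n
instance (n : Int) (out : Int) : Decidable (Spec_largest_factor n out) := by unfold Spec_largest_factor; infer_instance

-- ===== CLAIM (what is proved, stated in full; the proofs are below) =====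
def Claim_equal_largest_factor : Prop := ∀ (n : Int), Dom_largest_factor n → Spec_largest_factor n (largest_factor n)

-- ===== LEMMAS AND PROOFS =====

-- Nat models of A's two accumulators after k iterations, for n = m:
-- hAux m k = largest j ≤ k dividing m (0 if none), gAux m k = biggest1 after k steps.
def hAux (m : Nat) : Nat → Nat
  | 0 => 0
  | (k+1) => if (k+1) ∣ m then (k+1) else hAux m k

def gAux (m : Nat) : Nat → Nat
  | 0 => 1
  | (k+1) => if (k+1) ∣ m ∧ (k+1) ≠ m then (k+1) else gAux m k

theorem gAux_le (m k : Nat) : gAux m k ≤ max 1 k := by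
  induction k with
  | zero => simp [gAux]
  | succ k ih => simp only [gAux]; split <;> omega

theorem gAux_pos (m k : Nat) : 1 ≤ gAux m k := by
  induction k with
  | zero => simp [gAux]
  | succ k ih => simp only [gAux]; split <;> omega

theorem gAux_dvd (m k : Nat) : gAux m k ∣ m := by
  induction k with
  | zero => simp [gAux]
  | succ k ih =>
    simp only [gAux]; split
    · exact (by assumption : (k+1) ∣ m ∧ (k+1) ≠ m).1
    · exact ih

theorem gAux_ne (m k : Nat) (hm : 2 ≤ m) : gAux m k ≠ m := by
  induction k with
  | zero => simp [gAux]; omega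
  | succ k ih =>
    simp only [gAux]; split
    · exact (by assumption : (k+1) ∣ m ∧ (k+1) ≠ m).2
    · exact ih

theorem gAux_succ_le (m k : Nat) : gAux m k ≤ gAux m (k+1) := by
  have := gAux_le m k
  simp only [gAux]; split <;> omega

theorem gAux_of_dvd_le (m k j : Nat) (hj : j ∣ m) (hjm : j ≠ m) (hjk : j ≤ k) :
    j ≤ gAux m k := by
  induction k with
  | zero =>
    have hj0 : j = 0 := by omega
    subst hj0
    exact absurd ((Nat.zero_dvd).mp hj).symm hjm
  | succ k ih =>
    rcases Nat.lt_or_ge j (k+1) with h | h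
    · exact le_trans (ih (by omega)) (gAux_succ_le m k)
    · have hj' : j = k + 1 := by omega
      subst hj'
      simp only [gAux, if_pos (And.intro hj hjm)]
      omega

theorem gAux_eq_max (m k : Nat) (h : hAux m k ≠ m) : gAux m k = max 1 (hAux m k) := by
  induction k with
  | zero => simp [gAux, hAux]
  | succ k ih =>
    by_cases hd : (k+1) ∣ m
    · have hne : (k+1) ≠ m := by
        intro he; apply h; simp [hAux, he]
      simp [gAux, hAux, hd, hne] at h ⊢
    · simp only [hAux, if_neg hd] at h
      simp only [gAux, hAux, if_neg hd, if_neg (by tauto : ¬((k+1) ∣ m ∧ (k+1) ≠ m))]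
      exact ih h

-- a proper divisor g of m has cofactor m / g ≥ 2
theorem cofactor_ge_two (m g : Nat) (hg : g ∣ m) (hglt : g < m) :
    2 ≤ m / g := by
  have hmul : g * (m / g) = m := Nat.mul_div_cancel' hg
  by_contra hq2
  have hle : m / g ≤ 1 := by omega
  have : m ≤ g * 1 := by
    calc m = g * (m / g) := hmul.symm
      _ ≤ g * 1 := Nat.mul_le_mul_left g hle
  omega

-- the A-side loop invariant: after k iterations state = (k+1, gAux m k, hAux m k)
theorem stateA_eq (m : Nat) (k : Nat) :
    (stepA (m : Int))^[k] (1, 1, 0) = ((k : Int) + 1, ((gAux m k : Nat) : Int), ((hAux m k : Nat) : Int)) := by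
  induction k with
  | zero => simp [gAux, hAux]
  | succ k ih =>
    rw [Function.iterate_succ_apply', ih]
    have hcast : ((k : Int) + 1) = ((k + 1 : Nat) : Int) := by push_cast; ring
    have hmod : (PySem.Int.mod (m : Int) ((k : Int) + 1) = 0) ↔ ((k+1) ∣ m) := by
      rw [hcast, PySem.Int.mod_natCast]
      constructor
      · intro h
        exact Nat.dvd_of_mod_eq_zero (by exact_mod_cast h)
      · intro h
        exact_mod_cast congrArg (Nat.cast : Nat → Int) (Nat.mod_eq_zero_of_dvd h)
    by_cases hd : (k+1) ∣ m
    · by_cases hne : (k+1) = m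
      · -- biggest2 = n: biggest1 unchanged
        simp only [stepA, if_pos (hmod.mpr hd)]
        have hno : ¬(((gAux m k : Nat) : Int) < (k : Int) + 1 ∧ ((k : Int) + 1) ≠ (m : Int)) := by
          rintro ⟨_, hni⟩
          apply hni
          rw [hcast, hne]
        simp only [if_neg hno]
        have hg : gAux m (k+1) = gAux m k := by
          have hno' : ¬((k+1) ∣ m ∧ (k+1) ≠ m) := by tauto
          simp only [gAux, if_neg hno']
        have hh : hAux m (k+1) = k+1 := by simp [hAux, hd]
        rw [hg, hh]
        refine Prod.ext (by push_cast; ring) (Prod.ext rfl (by push_cast; ring))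
      · -- proper divisor k+1 found
        simp only [stepA, if_pos (hmod.mpr hd)]
        have hg : gAux m (k+1) = k+1 := by simp [gAux, hd, hne]
        have hh : hAux m (k+1) = k+1 := by simp [hAux, hd]
        rcases Nat.eq_zero_or_pos k with hk0 | hkpos
        · subst hk0
          -- k+1 = 1 divides m, m ≠ 1; biggest1 stays 1 = gAux m 1
          have h1 : gAux m 0 = 1 := rfl
          have hno : ¬(((gAux m 0 : Nat) : Int) < ((0 : Nat) : Int) + 1 ∧ (((0 : Nat) : Int) + 1) ≠ (m : Int)) := by
            rw [h1]; rintro ⟨hlt, _⟩; omega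
          rw [if_neg hno]
          rw [hg, hh, h1]
          norm_num
        · have hle : gAux m k ≤ k := by have := gAux_le m k; omega
          have hcond : (((gAux m k : Nat) : Int) < (k : Int) + 1 ∧ ((k : Int) + 1) ≠ (m : Int)) := by
            constructor
            · exact_mod_cast Nat.lt_succ_of_le hle
            · intro h; exact hne (by exact_mod_cast hcast ▸ h)
          simp only [if_pos hcond]
          rw [hg, hh]
          refine Prod.ext (by push_cast; ring) (Prod.ext (by rw [hcast]) (by rw [hcast]))
    · -- no new divisor
      simp only [stepA, if_neg (fun h => hd (hmod.mp h))]
      have hg : gAux m (k+1) = gAux m k := by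
        simp only [gAux, if_neg (by tauto : ¬((k+1) ∣ m ∧ (k+1) ≠ m))]
      have hh : hAux m (k+1) = hAux m k := by simp [hAux, hd]
      have hcond : ¬(((gAux m k : Nat) : Int) < ((hAux m k : Nat) : Int) ∧ ((hAux m k : Nat) : Int) ≠ (m : Int)) := by
        rintro ⟨hlt, hne⟩
        have hhm : hAux m k ≠ m := by
          intro h; exact hne (by exact_mod_cast congrArg (Nat.cast : Nat → Int) h)
        have hlt' : gAux m k < hAux m k := by exact_mod_cast hlt
        have := gAux_eq_max m k hhm
        omega
      simp only [if_neg hcond]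
      rw [hg, hh]
      exact Prod.ext (by push_cast; ring) rfl

theorem foldl_const_iterate {α β : Type} (f : α → α) (l : List β) (s : α) :
    l.foldl (fun s _ => f s) s = f^[l.length] s := by
  induction l generalizing s with
  | nil => rfl
  | cons x xs ih => simp [List.foldl, ih, Function.iterate_succ_apply]

theorem largest_factor_eq_gAux (m : Nat) : largest_factor (m : Int) = ((gAux m m : Nat) : Int) := by
  unfold largest_factor
  rw [foldl_const_iterate (stepA (m : Int)) _ (1,1,0)]
  rw [PySem.List.length_pyRange_one]
  have h : ((m : Int) - 0).toNat = m := by omega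
  rw [h, stateA_eq]

-- ===== B side: lfTrial from the smallest untried candidate d computes gAux m m =====
theorem lfTrial_eq (m : Nat) (hm : 2 ≤ m) (d : Nat) (hd : 2 ≤ d)
    (hleast : ∀ e, 2 ≤ e → e < d → ¬ e ∣ m) :
    lfTrial (m : Int) (d : Int) = ((gAux m m : Nat) : Int) := by
  have hgdvd : gAux m m ∣ m := gAux_dvd m m
  have hgne : gAux m m ≠ m := gAux_ne m m hm
  have hgpos : 1 ≤ gAux m m := gAux_pos m m
  have hglt : gAux m m < m := lt_of_le_of_ne (Nat.le_of_dvd (by omega) hgdvd) hgne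
  have hq : m / gAux m m ∣ m := Nat.div_dvd_of_dvd hgdvd
  have hmulg : gAux m m * (m / gAux m m) = m := Nat.mul_div_cancel' hgdvd
  by_cases hdd : d * d ≤ m
  · have hddI : ((d : Int)) * (d : Int) ≤ (m : Int) := by exact_mod_cast hdd
    by_cases hdvd : d ∣ m
    · -- d is the smallest divisor ≥ 2; the answer is m / d
      rw [lfTrial, dif_pos hddI]
      have hmod : PySem.Int.mod (m : Int) (d : Int) = 0 := by
        rw [PySem.Int.mod_natCast]
        exact_mod_cast congrArg (Nat.cast : Nat → Int) (Nat.mod_eq_zero_of_dvd hdvd)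
      rw [if_pos hmod, PySem.Int.floordiv_natCast]
      congr 1
      have hdivlt : m / d < m := Nat.div_lt_self (by omega) (by omega)
      have hdivdvd : m / d ∣ m := Nat.div_dvd_of_dvd hdvd
      have h1 : m / d ≤ gAux m m :=
        gAux_of_dvd_le m m (m / d) hdivdvd (by omega) (by omega)
      have hq2 : 2 ≤ m / gAux m m := cofactor_ge_two m (gAux m m) hgdvd hglt
      have hdq : d ≤ m / gAux m m := by
        by_contra hlt
        exact hleast (m / gAux m m) hq2 (by omega) hq
      have h2 : gAux m m ≤ m / d := by
        have hself := Nat.div_div_self hgdvd (by omega)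
        calc gAux m m = m / (m / gAux m m) := hself.symm
          _ ≤ m / d := Nat.div_le_div_left hdq (by omega)
      omega
    · -- d does not divide m: try d+1
      rw [lfTrial, dif_pos hddI]
      have hmod : PySem.Int.mod (m : Int) (d : Int) ≠ 0 := by
        rw [PySem.Int.mod_natCast]
        intro h
        exact hdvd (Nat.dvd_of_mod_eq_zero (by exact_mod_cast h))
      rw [if_neg hmod]
      have hcast : ((d : Int)) + 1 = ((d + 1 : Nat) : Int) := by push_cast; ring
      rw [hcast]
      refine lfTrial_eq m hm (d+1) (by omega) ?_
      intro e he hlt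
      rcases Nat.lt_or_ge e d with h | h
      · exact hleast e he h
      · have he' : e = d := by omega
        subst he'; exact hdvd
  · -- d*d > m: no divisor in [2, √m] remains, so m has no proper divisor > 1
    rw [lfTrial, dif_neg (fun h => hdd (by exact_mod_cast h))]
    have hg1 : gAux m m = 1 := by
      by_contra hne1
      have hg2 : 2 ≤ gAux m m := by omega
      have hq2 : 2 ≤ m / gAux m m := cofactor_ge_two m (gAux m m) hgdvd hglt
      rcases Nat.le_total (gAux m m) (m / gAux m m) with hle | hle
      · have hdg : d ≤ gAux m m := by
          by_contra h; exact hleast (gAux m m) hg2 (by omega) hgdvd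
        have : d * d ≤ gAux m m * (m / gAux m m) :=
          le_trans (Nat.mul_le_mul hdg hdg) (Nat.mul_le_mul_left (gAux m m) hle)
        omega
      · have hdg : d ≤ m / gAux m m := by
          by_contra h; exact hleast (m / gAux m m) hq2 (by omega) hq
        have h3 : d * d ≤ (m / gAux m m) * gAux m m :=
          le_trans (Nat.mul_le_mul hdg hdg) (Nat.mul_le_mul_left (m / gAux m m) hle)
        have hmulg' : m / gAux m m * gAux m m = m := by rw [Nat.mul_comm]; exact hmulg
        omega
    rw [hg1]; rfl
termination_by m + 1 - d
decreasing_by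
  have : d ≤ m := le_trans (Nat.le_mul_of_pos_left d (by omega)) hdd
  omega

-- ===== VERDICT (by name: the statement is the Claim_ definition above) =====
theorem largest_factor_spec : Claim_equal_largest_factor := by
  intro n _hdom
  unfold Spec_largest_factor largest_factor_alt
  by_cases hn : n ≤ 1
  · rw [if_pos hn]
    by_cases hn0 : n ≤ 0
    · unfold largest_factor
      rw [PySem.List.pyRange_one_eq_nil (by omega)]
      rfl
    · have h1 : n = 1 := by omega
      subst h1
      have h := largest_factor_eq_gAux 1
      have hg : gAux 1 1 = 1 := rfl
      rw [hg] at h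
      norm_num at h
      exact h
  · rw [if_neg (by omega)]
    have hm : n = ((n.toNat : Nat) : Int) := by omega
    have hm2 : 2 ≤ n.toNat := by omega
    rw [hm, largest_factor_eq_gAux]
    rw [(by norm_num : (2 : Int) = ((2 : Nat) : Int))]
    exact (lfTrial_eq n.toNat hm2 2 (le_refl 2) (by intro e he hlt; omega)).symm
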